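-- pv_equiv track=rewrite | github.com/DragunWF/Competitive-Programming | CodeWars/python/6_kyu/separating_strings.py | sep_str
-- ===== SOURCE A (Python) =====
-- def sep_str(s: str) -> list:
--     words = s.split(" ")
--     row_count = max(len(word) for word in words)
--     column_count = len(words)
--
--     output = []
--     for i in range(row_count):
--         row = []
--         for j in range(column_count):
--             row.append(words[j][i] if i < len(words[j]) else "")
--         output.append(row)
--
--     return output
-- ===== SOURCE B (Python) =====
-- def sep_str(s: str) -> list:
--     words = s.split(" ")
--     output = []
--     while any(words):
--         output.append([w[:1] for w in words])
--         words = [w[1:] for w in words]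
--     return output
-- ===== Notes on version B (the rewrite author's own statement) =====
-- stated objective: alternative
-- what changed: Replaces the index-based double loop (max length, bounds check, positional indexing) with a head-peeling transpose: repeatedly emit the first character of every word (empty string for exhausted words) and strip heads until all words are empty.
import Mathlib
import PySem

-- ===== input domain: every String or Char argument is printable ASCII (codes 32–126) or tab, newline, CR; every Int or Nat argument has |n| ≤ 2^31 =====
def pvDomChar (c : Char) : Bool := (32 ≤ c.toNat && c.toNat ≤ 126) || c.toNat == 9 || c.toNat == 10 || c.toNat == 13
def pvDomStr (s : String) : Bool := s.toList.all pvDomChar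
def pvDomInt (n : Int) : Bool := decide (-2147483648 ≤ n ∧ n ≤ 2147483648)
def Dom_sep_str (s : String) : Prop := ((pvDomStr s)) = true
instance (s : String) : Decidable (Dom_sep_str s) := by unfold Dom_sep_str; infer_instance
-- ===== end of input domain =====

-- B replaces A's index-based double loop with a head-peeling transpose (alternative decomposition, not faster).


-- ===== PORT A =====
-- words = s.split(" ") never yields an empty list, so the `.getD` defaults below are unreachable
def sep_str (s : String) : List (List String) :=
  let words := (PySem.Str.split? s " ").getD []
  let rowCount : Int := (PySem.List.max? (words.map (fun w => PySem.Str.len w)) id).getD 0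
  let columnCount : Int := words.length
  (PySem.List.pyRange 0 rowCount 1).foldl
    (fun output i =>
      output ++ [(PySem.List.pyRange 0 columnCount 1).foldl
        (fun row j =>
          let wj := PySem.List.pyGetD words j ""
          row ++ [if i < PySem.Str.len wj
                  then ((PySem.Str.pyGet? wj i).map (fun c => String.ofList [c])).getD ""
                  else ""])
        []])
    []

-- ===== PORT B =====
-- termination helper for the `while any(words)` loop: stripping heads shrinks the total character count
theorem sepGo_total_lt (ws : List String) (h : ws.any (fun w => w != "") = true) :
    ((ws.map (fun w => PySem.Str.slice w (some 1) none)).map (fun w => w.toList.length)).sum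
      < (ws.map (fun w => w.toList.length)).sum := by
  induction ws with
  | nil => simp at h
  | cons x xs ih =>
    simp only [List.any_cons, Bool.or_eq_true] at h
    have hx : (PySem.Str.slice x (some 1) none).toList = x.toList.drop 1 := by
      rw [PySem.Str.toList_slice, PySem.Chars.slice_eq_listSlice]
      exact_mod_cast PySem.List.slice_from_natCast x.toList 1
    have hlenx : (PySem.Str.slice x (some 1) none).toList.length = x.toList.length - 1 := by
      rw [hx]; simp
    rcases h with h | h
    · have : x.toList ≠ [] := by
        intro hz
        have : x = "" := String.toList_inj.mp (by simp [hz])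
        simp [this] at h
      have hxpos : 0 < x.toList.length := List.length_pos_iff.mpr this
      have hle : ∀ (l : List String),
          ((l.map (fun w => PySem.Str.slice w (some 1) none)).map (fun w => w.toList.length)).sum
            ≤ (l.map (fun w => w.toList.length)).sum := by
        intro l
        induction l with
        | nil => simp
        | cons y ys ihy =>
          simp only [List.map_cons, List.sum_cons]
          have : (PySem.Str.slice y (some 1) none).toList.length ≤ y.toList.length := by
            rw [PySem.Str.toList_slice, PySem.Chars.slice_eq_listSlice]
            rw [show ((1 : Int)) = ((1 : Nat) : Int) by norm_num, PySem.List.slice_from_natCast]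
            simp
          omega
      have := hle xs
      simp only [List.map_cons, List.sum_cons]
      omega
    · have := ih h
      simp only [List.map_cons, List.sum_cons] at *
      omega

def sepGo (ws : List String) : List (List String) :=
  if h : ws.any (fun w => w != "") = true then
    (ws.map (fun w => PySem.Str.slice w none (some 1)))
      :: sepGo (ws.map (fun w => PySem.Str.slice w (some 1) none))
  else []
termination_by (ws.map (fun w => w.toList.length)).sum
decreasing_by simpa using sepGo_total_lt ws h

def sep_str_alt (s : String) : List (List String) :=
  sepGo ((PySem.Str.split? s " ").getD [])

-- ===== PRECONDITION & SPEC =====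
def Spec_sep_str (s : String) (out : List (List String)) : Prop := out = sep_str_alt s
instance (s : String) (out : List (List String)) : Decidable (Spec_sep_str s out) := by unfold Spec_sep_str; infer_instance

-- ===== CLAIM (what is proved, stated in full; the proofs are below) =====
def Claim_equal_sep_str : Prop := ∀ (s : String), Dom_sep_str s → Spec_sep_str s (sep_str s)

-- ===== LEMMAS AND PROOFS =====

-- canonical cell: A's inner-loop body as a function of the word and the row index
def cellA (w : String) (i : Int) : String :=
  if i < PySem.Str.len w
  then ((PySem.Str.pyGet? w i).map (fun c => String.ofList [c])).getD ""
  else ""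

def maxLenN (ws : List String) : Nat := (ws.map (fun w => w.toList.length)).foldr max 0

theorem mem_le_maxLenN {ws : List String} {w : String} (h : w ∈ ws) :
    w.toList.length ≤ maxLenN ws := by
  induction ws with
  | nil => simp at h
  | cons x xs ih =>
    rcases List.mem_cons.mp h with rfl | h
    · simp [maxLenN]
    · have := ih h
      simp only [maxLenN, List.map_cons, List.foldr_cons] at *
      omega

theorem maxLenN_exists {ws : List String} (h : ws ≠ []) :
    ∃ w ∈ ws, maxLenN ws ≤ w.toList.length := by
  induction ws with
  | nil => simp at h
  | cons x xs ih =>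
    rcases eq_or_ne xs [] with rfl | hne
    · exact ⟨x, by simp, by simp [maxLenN]⟩
    · obtain ⟨w, hw, hle⟩ := ih hne
      by_cases hx : maxLenN xs ≤ x.toList.length
      · exact ⟨x, by simp, by simp only [maxLenN, List.map_cons, List.foldr_cons] at *; omega⟩
      · exact ⟨w, by simp [hw], by simp only [maxLenN, List.map_cons, List.foldr_cons] at *; omega⟩

theorem maxR (ws : List String) :
    ((PySem.List.max? (ws.map (fun w => PySem.Str.len w)) id).getD 0) = (maxLenN ws : Int) := by
  rcases eq_or_ne ws [] with rfl | hne
  · simp [maxLenN, PySem.List.max?]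
  · obtain ⟨m, hm⟩ : ∃ m, PySem.List.max? (ws.map (fun w => PySem.Str.len w)) id = some m := by
      obtain ⟨w, rest, rfl⟩ : ∃ w rest, ws = w :: rest := by
        cases ws with
        | nil => exact absurd rfl hne
        | cons w rest => exact ⟨w, rest, rfl⟩
      have aux : ∀ (f : Option Int → Int → Option Int),
          (∀ a x, ∃ b, f (some a) x = some b) →
          ∀ (l : List Int) (a : Int), ∃ m, List.foldl f (some a) l = some m := by
        intro f hf l
        induction l with
        | nil => exact fun a => ⟨a, rfl⟩
        | cons y ys ih =>
          intro a
          obtain ⟨b, hb⟩ := hf a y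
          simpa [List.foldl_cons, hb] using ih b
      simp only [PySem.List.max?, List.map_cons, List.foldl_cons]
      exact aux _ (fun a x => by dsimp only; split <;> exact ⟨_, rfl⟩)
        (rest.map (fun w => PySem.Str.len w)) (PySem.Str.len w)
    have hmem := PySem.List.max?_mem hm
    have hmax := PySem.List.max?_isMax hm
    obtain ⟨w, hw, rfl⟩ := List.mem_map.mp hmem
    obtain ⟨w0, hw0, hle0⟩ := maxLenN_exists hne
    have h1 : PySem.Str.len w0 ≤ PySem.Str.len w :=
      hmax _ (List.mem_map.mpr ⟨w0, hw0, rfl⟩)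
    have h2 := mem_le_maxLenN hw
    simp only [PySem.Str.len_eq] at *
    rw [hm]
    simp only [Option.getD_some, id] at *
    omega


-- A's nested foldl-append loops are maps over ranges
theorem sepA_form (ws : List String) :
    (PySem.List.pyRange 0 ((PySem.List.max? (ws.map (fun w => PySem.Str.len w)) id).getD 0) 1).foldl
      (fun output i =>
        output ++ [(PySem.List.pyRange 0 (ws.length : Int) 1).foldl
          (fun row j =>
            let wj := PySem.List.pyGetD ws j ""
            row ++ [if i < PySem.Str.len wj
                    then ((PySem.Str.pyGet? wj i).map (fun c => String.ofList [c])).getD ""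
                    else ""])
          []])
      []
    = (List.range (maxLenN ws)).map (fun (k : Nat) => ws.map (fun w => cellA w (k : Int))) := by
  rw [maxR]
  have hinner : ∀ i : Int,
      (PySem.List.pyRange 0 (ws.length : Int) 1).foldl
        (fun row j =>
          let wj := PySem.List.pyGetD ws j ""
          row ++ [if i < PySem.Str.len wj
                  then ((PySem.Str.pyGet? wj i).map (fun c => String.ofList [c])).getD ""
                  else ""])
        []
      = ws.map (fun w => cellA w i) := by
    intro i
    have hfun : (fun (row : List String) (j : Int) =>
          let wj := PySem.List.pyGetD ws j ""
          row ++ [if i < PySem.Str.len wj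
                  then ((PySem.Str.pyGet? wj i).map (fun c => String.ofList [c])).getD ""
                  else ""])
        = (fun row j => row ++ [((fun w => cellA w i) ∘ (fun j => PySem.List.pyGetD ws j "")) j]) := by
      funext row j; simp [cellA]
    rw [hfun, PySem.List.foldl_append_singleton_eq_map
        ((fun w => cellA w i) ∘ (fun j => PySem.List.pyGetD ws j ""))]
    rw [← List.map_map, PySem.List.map_pyGetD_pyRange_zero' ws ""]
    simp
  have houter : (fun (output : List (List String)) (i : Int) =>
        output ++ [(PySem.List.pyRange 0 (ws.length : Int) 1).foldl
          (fun row j =>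
            let wj := PySem.List.pyGetD ws j ""
            row ++ [if i < PySem.Str.len wj
                    then ((PySem.Str.pyGet? wj i).map (fun c => String.ofList [c])).getD ""
                    else ""])
          []])
      = (fun output i => output ++ [(fun i => ws.map (fun w => cellA w i)) i]) := by
    funext output i; rw [hinner i]
  rw [houter, PySem.List.foldl_append_singleton_eq_map (fun i => ws.map (fun w => cellA w i))]
  rw [PySem.List.pyRange_one]
  simp only [sub_zero, Int.toNat_natCast, zero_add]
  generalize (List.range (maxLenN ws)) = l
  induction l with
  | nil => rfl
  | cons x xs ih => simp

theorem toList_tail1 (w : String) :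
    (PySem.Str.slice w (some 1) none).toList = w.toList.drop 1 := by
  rw [PySem.Str.toList_slice, PySem.Chars.slice_eq_listSlice]
  exact_mod_cast PySem.List.slice_from_natCast w.toList 1

theorem toList_head1 (w : String) :
    (PySem.Str.slice w none (some 1)).toList = w.toList.take 1 := by
  rw [PySem.Str.toList_slice, PySem.Chars.slice_eq_listSlice]
  exact_mod_cast PySem.List.slice_to_natCast w.toList 1

theorem maxLenN_zero_iff (ws : List String) :
    maxLenN ws = 0 ↔ ws.any (fun w => w != "") = false := by
  induction ws with
  | nil => simp [maxLenN]
  | cons x xs ih =>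
    simp only [maxLenN, List.map_cons, List.foldr_cons, List.any_cons, Bool.or_eq_false_iff] at *
    constructor
    · intro h
      have hx : x.toList.length = 0 := by omega
      have : x = "" := String.toList_inj.mp (by simpa using List.length_eq_zero_iff.mp hx)
      exact ⟨by simp [this], ih.mp (by omega)⟩
    · rintro ⟨h1, h2⟩
      have hx : x = "" := by simpa using h1
      simp [hx]
      exact ih.mpr h2

theorem maxLenN_tails (ws : List String) :
    maxLenN (ws.map (fun w => PySem.Str.slice w (some 1) none)) = maxLenN ws - 1 := by
  induction ws with
  | nil => simp [maxLenN]
  | cons x xs ih =>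
    simp only [maxLenN, List.map_cons, List.foldr_cons] at *
    rw [toList_tail1]
    simp only [List.length_drop]
    omega

theorem head1_eq_cellA0 (w : String) :
    PySem.Str.slice w none (some 1) = cellA w 0 := by
  apply String.toList_inj.mp
  rw [toList_head1]
  cases h : w.toList with
  | nil =>
    have : w = "" := String.toList_inj.mp (by simpa using h)
    subst this
    simp at h ⊢
    decide
  | cons c rest =>
    simp only [cellA, PySem.Str.len_eq, h, PySem.Str.pyGet?_eq,
      PySem.Chars.pyGet?_eq_listPyGet?]
    rw [if_pos (by simp)]
    rw [show PySem.List.pyGet? (c :: rest) 0 = some c from PySem.List.pyGet?_zero_cons c rest]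
    simp

theorem cell_shift (w : String) (k : Nat) :
    cellA w ((k : Int) + 1) = cellA (PySem.Str.slice w (some 1) none) (k : Int) := by
  simp only [cellA, PySem.Str.len_eq, toList_tail1, PySem.Str.pyGet?_eq,
    PySem.Chars.pyGet?_eq_listPyGet?, List.length_drop]
  by_cases hlt : (k : Int) + 1 < (w.toList.length : Int)
  · rw [if_pos hlt, if_pos (by omega)]
    obtain ⟨c, rest, hcr⟩ : ∃ c rest, w.toList = c :: rest := by
      cases hw : w.toList with
      | nil => rw [hw] at hlt; simp at hlt; omega
      | cons c rest => exact ⟨c, rest, rfl⟩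
    rw [hcr, List.drop_one, List.tail_cons,
      show ((k : Int) + 1) = ((k : Nat) : Int) + 1 from rfl,
      PySem.List.pyGet?_cons_succ]
  · rw [if_neg hlt, if_neg (by omega)]

theorem sepGo_eq : ∀ (n : Nat) (ws : List String), maxLenN ws = n →
    sepGo ws = (List.range n).map (fun (k : Nat) => ws.map (fun w => cellA w (k : Int))) := by
  intro n
  induction n with
  | zero =>
    intro ws h
    rw [sepGo, dif_neg (by simp [(maxLenN_zero_iff ws).mp h])]
    simp
  | succ n ih =>
    intro ws h
    have hany : ws.any (fun w => w != "") = true := by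
      cases hb : ws.any (fun w => w != "") with
      | false => rw [(maxLenN_zero_iff ws).mpr hb] at h; omega
      | true => rfl
    rw [sepGo, dif_pos hany]
    have htails : maxLenN (ws.map (fun w => PySem.Str.slice w (some 1) none)) = n := by
      rw [maxLenN_tails, h]; omega
    rw [ih _ htails, List.range_succ_eq_map, List.map_cons, List.map_map]
    have hheads : ws.map (fun w => PySem.Str.slice w none (some 1))
        = ws.map (fun w => cellA w (((0 : Nat) : Int))) := by
      refine List.map_congr_left (fun w _ => ?_)
      rw [head1_eq_cellA0]; norm_num
    have hshift : ∀ k : Nat,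
        ws.map (fun w => cellA (PySem.Str.slice w (some 1) none) (k : Int))
          = ws.map (fun w => cellA w ((k : Int) + 1)) := by
      intro k
      exact List.map_congr_left (fun w _ => (cell_shift w k).symm)
    rw [hheads]
    congr 1
    refine List.map_congr_left (fun k _ => ?_)
    simp only [List.map_map, Function.comp_def]
    rw [hshift k]
    norm_num

-- ===== VERDICT (by name: the statement is the Claim_ definition above) =====
theorem sep_str_spec : Claim_equal_sep_str := by
  intro s _
  unfold Spec_sep_str sep_str sep_str_alt
  exact (sepA_form ((PySem.Str.split? s " ").getD [])).trans
    (sepGo_eq (maxLenN ((PySem.Str.split? s " ").getD [])) _ rfl).symm
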